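-- pv_equiv track=rewrite | github.com/codecontemplator/aoc2024 | day24/trash/day24p2.py | backtracking_distinct_groups
-- ===== SOURCE A (Python) =====
-- from itertools import combinations
--
-- def backtracking_distinct_groups(lst, group_size):
--     indices = range(len(lst))
--     all_pairs = list(combinations(indices, 2))
--     results = []
--
--     def backtrack(group, start):
--         if len(group) == group_size:
--             results.append(group[:])
--             return
--
--         for i in range(start, len(all_pairs)):
--             pair = all_pairs[i]
--             # Ensure pair does not overlap with current group
--             if not any(set(pair) & set(p) for p in group):
--                 group.append(pair)
--                 backtrack(group, i + 1)
--                 group.pop()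
--
--     backtrack([], 0)
--     return results
-- ===== SOURCE B (Python) =====
-- from itertools import combinations
--
-- def backtracking_distinct_groups(lst, group_size):
--     all_pairs = list(combinations(range(len(lst)), 2))
--     if group_size > len(all_pairs):
--         return []
--     return [list(combo) for combo in combinations(all_pairs, group_size)
--             if all(set(p).isdisjoint(q) for p, q in combinations(combo, 2))]
-- ===== Notes on version B (the rewrite author's own statement) =====
-- stated objective: simpler
-- what changed: Replaced the pruned recursive backtracking (mutable group/start state) with a flat generate-and-test: iterate combinations(all_pairs, group_size) and keep the combos whose pairs are pairwise disjoint.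
-- outside the precondition, e.g. on backtracking_distinct_groups([1, 2, 3], -1): A returns [], B raises ValueError
import Mathlib
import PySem

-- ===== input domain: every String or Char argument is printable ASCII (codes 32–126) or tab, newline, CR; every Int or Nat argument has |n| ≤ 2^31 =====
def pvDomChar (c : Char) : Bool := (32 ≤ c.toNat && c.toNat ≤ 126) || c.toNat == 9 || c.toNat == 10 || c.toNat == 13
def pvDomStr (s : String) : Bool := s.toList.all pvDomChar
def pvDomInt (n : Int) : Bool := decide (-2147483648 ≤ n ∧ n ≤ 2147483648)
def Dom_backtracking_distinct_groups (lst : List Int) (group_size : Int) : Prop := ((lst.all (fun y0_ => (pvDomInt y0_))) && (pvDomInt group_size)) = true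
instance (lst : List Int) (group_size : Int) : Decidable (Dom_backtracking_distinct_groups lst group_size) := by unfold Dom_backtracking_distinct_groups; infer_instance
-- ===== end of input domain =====

-- B replaces A's pruned recursive backtracking by a flat generate-and-test over
-- combinations(all_pairs, group_size) filtered for pairwise-disjoint pairs (objective: simpler).

-- ===== PORT A =====
-- combinations(range(n), 2), in itertools order
def pvAllPairs (n : Nat) : List (Int × Int) :=
  (List.range n).flatMap (fun i => (List.range' (i + 1) (n - (i + 1))).map (fun j => ((i : Int), (j : Int))))

-- set(pair) & set(p) is truthy  ⇔  the two pairs share a component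
def pvOverlap (p q : Int × Int) : Bool :=
  p.1 == q.1 || p.1 == q.2 || p.2 == q.1 || p.2 == q.2

-- A's `backtrack(group, start)`: the loop `for i in range(start, len(all_pairs))`
-- becomes structural recursion over `rest = all_pairs[start:]`
def pvBacktrack (gs : Int) (group rest : List (Int × Int)) : List (List (Int × Int)) :=
  if (group.length : Int) == gs then [group]
  else
    match rest with
    | [] => []
    | p :: rs =>
      (if group.any (fun q => pvOverlap p q) then [] else pvBacktrack gs (group ++ [p]) rs)
        ++ pvBacktrack gs group rs
termination_by rest.length
decreasing_by all_goals simp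

def backtracking_distinct_groups (lst : List Int) (group_size : Int) : List (List (Int × Int)) :=
  pvBacktrack group_size [] (pvAllPairs lst.length)

-- ===== PORT B =====
-- combinations(xs, k) over a list, in itertools order
def pvCombs : Nat → List (Int × Int) → List (List (Int × Int))
  | 0, _ => [[]]
  | _ + 1, [] => []
  | k + 1, x :: xs => (pvCombs k xs).map (fun c => x :: c) ++ pvCombs (k + 1) xs

-- combinations(combo, 2) as a list of (p, q) with p before q
def pvPairs2 : List (Int × Int) → List ((Int × Int) × (Int × Int))
  | [] => []
  | x :: xs => xs.map (fun y => (x, y)) ++ pvPairs2 xs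

-- set(p).isdisjoint(q)
def pvIsDisjoint (p q : Int × Int) : Bool :=
  !(p.1 == q.1 || p.1 == q.2 || p.2 == q.1 || p.2 == q.2)

def backtracking_distinct_groups_alt (lst : List Int) (group_size : Int) : List (List (Int × Int)) :=
  if group_size > ((pvAllPairs lst.length).length : Int) then []
  else
    (pvCombs group_size.toNat (pvAllPairs lst.length)).filter
      (fun c => (pvPairs2 c).all (fun pq => pvIsDisjoint pq.1 pq.2))

-- ===== PRECONDITION & SPEC =====
-- Pre_ excludes negative group_size, on which A returns [] but B's combinations(..., r) raises ValueError.
def Pre_backtracking_distinct_groups (lst : List Int) (group_size : Int) : Prop := 0 ≤ group_size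
instance (lst : List Int) (group_size : Int) : Decidable (Pre_backtracking_distinct_groups lst group_size) := by unfold Pre_backtracking_distinct_groups; infer_instance
def pvWitness_backtracking_distinct_groups : List Int × Int := ([0, 1, 2], 1)

def Spec_backtracking_distinct_groups (lst : List Int) (group_size : Int) (out : List (List (Int × Int))) : Prop := out = backtracking_distinct_groups_alt lst group_size
instance (lst : List Int) (group_size : Int) (out : List (List (Int × Int))) : Decidable (Spec_backtracking_distinct_groups lst group_size out) := by unfold Spec_backtracking_distinct_groups; infer_instance

-- ===== CLAIM (what is proved, stated in full; the proofs are below) =====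
def Claim_equal_backtracking_distinct_groups : Prop := ∀ (lst : List Int) (group_size : Int), Dom_backtracking_distinct_groups lst group_size → Pre_backtracking_distinct_groups lst group_size → Spec_backtracking_distinct_groups lst group_size (backtracking_distinct_groups lst group_size)

-- ===== LEMMAS AND PROOFS =====
-- A's running disjointness check, expressed on a candidate combination:
-- each pair is disjoint from `group` and from all earlier pairs of the combination.
def pvChainOk (group : List (Int × Int)) : List (Int × Int) → Bool
  | [] => true
  | p :: cs => !group.any (fun q => pvOverlap p q) && pvChainOk (group ++ [p]) cs

-- choosing more than xs.length elements is impossible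
theorem pvCombs_nil (xs : List (Int × Int)) : ∀ k, xs.length < k → pvCombs k xs = [] := by
  induction xs with
  | nil => intro k h; cases k with | zero => omega | succ k => rfl
  | cons x xs ih =>
    intro k h
    cases k with
    | zero => omega
    | succ k => simp at h; simp [pvCombs, ih k (by omega), ih (k + 1) (by omega)]

-- invariant of A's recursion
theorem pvBacktrack_eq (rest : List (Int × Int)) :
    ∀ (k : Nat) (group : List (Int × Int)) (gs : Int), (group.length : Int) + k = gs →
    pvBacktrack gs group rest
      = ((pvCombs k rest).filter (pvChainOk group)).map (fun c => group ++ c) := by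
  induction rest with
  | nil =>
    intro k group gs h
    cases k with
    | zero => rw [pvBacktrack]; simp_all [pvCombs, pvChainOk]
    | succ k =>
      have : (group.length : Int) ≠ gs := by omega
      rw [pvBacktrack]; simp_all [pvCombs]
  | cons p rs ih =>
    intro k group gs h
    cases k with
    | zero => rw [pvBacktrack]; simp_all [pvCombs, pvChainOk]
    | succ k =>
      have hne : ((group.length : Int) == gs) = false := by
        simp only [beq_eq_false_iff_ne]; omega
      rw [pvBacktrack, hne]
      simp only [Bool.false_eq_true, if_false, pvCombs, List.filter_append, List.map_append]
      rw [ih k (group ++ [p]) gs (by simp; omega), ih (k + 1) group gs (by omega)]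
      by_cases hov : group.any (fun q => pvOverlap p q)
      · simp [hov, List.filter_map, Function.comp_def, pvChainOk]
      · simp only [hov, Bool.false_eq_true, if_false]
        rw [List.filter_map]
        simp only [Function.comp_def, pvChainOk, Bool.not_eq_true] at *
        simp [hov, List.map_map, Function.comp_def]

-- helper: pointwise-equal predicates give equal `all`
theorem pvAll_congr {α : Type} (l : List α) (f g : α → Bool)
    (h : ∀ x ∈ l, f x = g x) : l.all f = l.all g := by
  induction l with
  | nil => rfl
  | cons x xs ih => simp_all [List.all_cons]

-- helper: Bool `all` of a conjunction splits
theorem pvAll_and {α : Type} (l : List α) (f g : α → Bool) :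
    l.all (fun x => f x && g x) = (l.all f && l.all g) := by
  induction l with
  | nil => rfl
  | cons x xs ih =>
    simp only [List.all_cons, ih]
    apply Bool.eq_iff_iff.mpr
    simp
    tauto

-- A's chained check equals: disjoint-from-group on each element, plus pairwise disjoint.
theorem pvChainOk_eq (c : List (Int × Int)) :
    ∀ group, pvChainOk group c
      = (c.all (fun p => !group.any (fun q => pvOverlap p q))
          && (pvPairs2 c).all (fun pq => pvIsDisjoint pq.1 pq.2)) := by
  induction c with
  | nil => intro group; rfl
  | cons p cs ih =>
    intro group
    rw [pvChainOk, ih (group ++ [p])]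
    have h1 : cs.all (fun r => !(group ++ [p]).any (fun q => pvOverlap r q))
        = (cs.all (fun r => !group.any (fun q => pvOverlap r q))
            && cs.all (fun r => !pvOverlap r p)) := by
      rw [← pvAll_and]
      apply pvAll_congr
      intro r _
      apply Bool.eq_iff_iff.mpr
      simp
    rw [h1]
    have h2 : (pvPairs2 (p :: cs)).all (fun pq => pvIsDisjoint pq.1 pq.2)
        = (cs.all (fun r => !pvOverlap r p)
            && (pvPairs2 cs).all (fun pq => pvIsDisjoint pq.1 pq.2)) := by
      rw [pvPairs2]
      simp only [List.all_append, List.all_map]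
      congr 1
      apply pvAll_congr
      intro r _
      apply Bool.eq_iff_iff.mpr
      simp [Function.comp, pvIsDisjoint, pvOverlap]
      tauto
    simp only [List.all_cons, h2]
    apply Bool.eq_iff_iff.mpr
    simp
    tauto

-- ===== VERDICT (by name: the statement is the Claim_ definition above) =====
theorem backtracking_distinct_groups_spec : Claim_equal_backtracking_distinct_groups := by
  intro lst group_size _ hpre
  unfold Spec_backtracking_distinct_groups backtracking_distinct_groups backtracking_distinct_groups_alt
  rw [pvBacktrack_eq (pvAllPairs lst.length) group_size.toNat [] group_size
      (by simpa using Int.toNat_of_nonneg hpre)]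
  have hfilt : ∀ c ∈ pvCombs group_size.toNat (pvAllPairs lst.length),
      pvChainOk [] c = (pvPairs2 c).all (fun pq => pvIsDisjoint pq.1 pq.2) := by
    intro c _
    rw [pvChainOk_eq c []]
    simp
  rw [List.filter_congr hfilt]
  split_ifs with hgt
  · rw [pvCombs_nil _ group_size.toNat (by omega)]
    simp
  · simp
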